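-- pv_equiv track=rewrite | github.com/martin919191/qr_generator | qr_generator.py | determine_smallest_qr_version
-- ===== SOURCE A (Python) =====
-- ENCODING_DATA_SIZES = {
--     "NUMERIC_MODE": {
--         "L": "41,77,127,187,255,322,370,461,552,652,772,883,1022,1101,1250,1408,1548,1725,1903,2061,2232,2409,2620,2812,3057,3283,3517,3669,3909,4158,4417,4686,4965,5253,5529,5836,6153,6479,6743,7089",
--         "M": "34,63,101,149,202,255,293,365,432,513,604,691,796,871,991,1082,1212,1346,1500,1600,1708,1872,2059,2188,2395,2544,2701,2857,3035,3289,3486,3693,3909,4134,4343,4588,4775,5039,5313,5596",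
--         "Q": "27,48,77,111,144,178,207,259,312,364,427,489,580,621,703,775,876,948,1063,1159,1224,1358,1468,1588,1718,1804,1933,2085,2181,2358,2473,2670,2805,2949,3081,3244,3417,3599,3791,3993",
--         "H": "17,34,58,82,106,139,154,202,235,288,331,374,427,468,530,602,674,746,813,919,969,1056,1108,1228,1286,1425,1501,1581,1677,1782,1897,2022,2157,2301,2361,2524,2625,2735,2927,3057"
--     },
--     "ALPHANUMERIC_MODE": {
--         "L": "25,47,77,114,154,195,224,279,335,395,468,535,619,667,758,854,938,1046,1153,1249,1352,1460,1588,1704,1853,1990,2132,2223,2369,2520,2677,2840,3009,3183,3351,3537,3729,3927,4087,4296",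
--         "M": "20,38,61,90,122,154,178,221,262,311,366,419,483,528,600,656,734,816,909,970,1035,1134,1248,1326,1451,1542,1637,1732,1839,1994,2113,2238,2369,2506,2632,2780,2894,3054,3220,3391",
--         "Q": "16,29,47,67,87,108,125,157,189,221,259,296,352,376,426,470,531,574,644,702,742,823,890,963,1041,1094,1172,1263,1322,1429,1499,1618,1700,1787,1867,1966,2071,2181,2298,2420",
--         "H": "10,20,35,50,64,84,93,122,143,174,200,227,259,283,321,365,408,452,493,557,587,640,672,744,779,864,910,958,1016,1080,1150,1226,1307,1394,1431,1530,1591,1658,1774,1852"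
--     },
--     "BYTE_MODE": {
--         "L": "17,32,53,78,106,134,154,192,230,271,321,367,425,458,520,586,644,718,792,858,929,1003,1091,1171,1273,1367,1465,1528,1628,1732,1840,1952,2068,2188,2303,2431,2563,2699,2809,2953",
--         "M": "14,26,42,62,84,106,122,152,180,213,251,287,331,362,412,450,504,560,624,666,711,779,857,911,997,1059,1125,1190,1264,1370,1452,1538,1628,1722,1809,1911,1989,2099,2213,2331",
--         "Q": "11,20,32,46,60,74,86,108,130,151,177,203,241,258,292,322,364,394,442,482,509,565,611,661,715,751,805,868,908,982,1030,1112,1168,1228,1283,1351,1423,1499,1579,1663",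
--         "H": "7,14,24,34,44,58,64,84,98,119,137,155,177,194,220,250,280,310,338,382,403,439,461,511,535,593,625,658,698,742,790,842,898,958,983,1051,1093,1139,1219,1273"
--     },
--     "KANJI_MODE": {
--         "L": "10,20,32,48,65,82,95,118,141,167,198,226,262,282,320,361,397,442,488,528,572,618,672,721,784,842,902,940,1002,1066,1132,1201,1273,1347,1417,1496,1577,1661,1729,1817",
--         "M": "8,16,26,38,52,65,75,93,111,131,155,177,204,223,254,277,310,345,384,410,438,480,528,561,614,652,692,732,778,843,894,947,1002,1060,1113,1176,1224,1292,1362,1435",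
--         "Q": "7,12,20,28,37,45,53,66,80,93,109,125,149,159,180,198,224,243,272,297,314,348,376,407,440,462,496,534,559,604,634,684,719,756,790,832,876,923,972,1024",
--         "H": "4,8,15,21,27,36,39,52,60,74,85,96,109,120,136,154,173,191,208,235,248,270,284,315,330,365,385,405,430,457,486,518,553,590,605,647,673,701,750,784"
--     }
-- }
--
-- def determine_smallest_qr_version(
--         encoding_mode: str,
--         error_correction_level: str,
--         data: str):
--     """
--     The following function returns the smallest QR version that can accomodate
--     the number of characters in the data.
--
--     :data: The data to be encoded.
--     :return: A string with the number that represents the QR version, starting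
--     from '1'.
--     """
--     sizes = ENCODING_DATA_SIZES[encoding_mode][error_correction_level]
--     i = 0
--     for size in sizes.split(","):
--         i += 1
--         if len(data) <= int(size):
--             return i
--
--     raise Exception("Data is too large to be fit in any of the QR versions. Please shorten the data.")
-- ===== SOURCE B (Python) =====
-- # B: capacity table stored directly as sorted int lists; binary search (bisect_left) finds the version.
-- CAPACITY_TABLE = {
--     "NUMERIC_MODE": {
--         "L": [41, 77, 127, 187, 255, 322, 370, 461, 552, 652, 772, 883, 1022, 1101, 1250, 1408, 1548, 1725, 1903, 2061, 2232, 2409, 2620, 2812, 3057, 3283, 3517, 3669, 3909, 4158, 4417, 4686, 4965, 5253, 5529, 5836, 6153, 6479, 6743, 7089],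
--         "M": [34, 63, 101, 149, 202, 255, 293, 365, 432, 513, 604, 691, 796, 871, 991, 1082, 1212, 1346, 1500, 1600, 1708, 1872, 2059, 2188, 2395, 2544, 2701, 2857, 3035, 3289, 3486, 3693, 3909, 4134, 4343, 4588, 4775, 5039, 5313, 5596],
--         "Q": [27, 48, 77, 111, 144, 178, 207, 259, 312, 364, 427, 489, 580, 621, 703, 775, 876, 948, 1063, 1159, 1224, 1358, 1468, 1588, 1718, 1804, 1933, 2085, 2181, 2358, 2473, 2670, 2805, 2949, 3081, 3244, 3417, 3599, 3791, 3993],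
--         "H": [17, 34, 58, 82, 106, 139, 154, 202, 235, 288, 331, 374, 427, 468, 530, 602, 674, 746, 813, 919, 969, 1056, 1108, 1228, 1286, 1425, 1501, 1581, 1677, 1782, 1897, 2022, 2157, 2301, 2361, 2524, 2625, 2735, 2927, 3057],
--     },
--     "ALPHANUMERIC_MODE": {
--         "L": [25, 47, 77, 114, 154, 195, 224, 279, 335, 395, 468, 535, 619, 667, 758, 854, 938, 1046, 1153, 1249, 1352, 1460, 1588, 1704, 1853, 1990, 2132, 2223, 2369, 2520, 2677, 2840, 3009, 3183, 3351, 3537, 3729, 3927, 4087, 4296],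
--         "M": [20, 38, 61, 90, 122, 154, 178, 221, 262, 311, 366, 419, 483, 528, 600, 656, 734, 816, 909, 970, 1035, 1134, 1248, 1326, 1451, 1542, 1637, 1732, 1839, 1994, 2113, 2238, 2369, 2506, 2632, 2780, 2894, 3054, 3220, 3391],
--         "Q": [16, 29, 47, 67, 87, 108, 125, 157, 189, 221, 259, 296, 352, 376, 426, 470, 531, 574, 644, 702, 742, 823, 890, 963, 1041, 1094, 1172, 1263, 1322, 1429, 1499, 1618, 1700, 1787, 1867, 1966, 2071, 2181, 2298, 2420],
--         "H": [10, 20, 35, 50, 64, 84, 93, 122, 143, 174, 200, 227, 259, 283, 321, 365, 408, 452, 493, 557, 587, 640, 672, 744, 779, 864, 910, 958, 1016, 1080, 1150, 1226, 1307, 1394, 1431, 1530, 1591, 1658, 1774, 1852],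
--     },
--     "BYTE_MODE": {
--         "L": [17, 32, 53, 78, 106, 134, 154, 192, 230, 271, 321, 367, 425, 458, 520, 586, 644, 718, 792, 858, 929, 1003, 1091, 1171, 1273, 1367, 1465, 1528, 1628, 1732, 1840, 1952, 2068, 2188, 2303, 2431, 2563, 2699, 2809, 2953],
--         "M": [14, 26, 42, 62, 84, 106, 122, 152, 180, 213, 251, 287, 331, 362, 412, 450, 504, 560, 624, 666, 711, 779, 857, 911, 997, 1059, 1125, 1190, 1264, 1370, 1452, 1538, 1628, 1722, 1809, 1911, 1989, 2099, 2213, 2331],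
--         "Q": [11, 20, 32, 46, 60, 74, 86, 108, 130, 151, 177, 203, 241, 258, 292, 322, 364, 394, 442, 482, 509, 565, 611, 661, 715, 751, 805, 868, 908, 982, 1030, 1112, 1168, 1228, 1283, 1351, 1423, 1499, 1579, 1663],
--         "H": [7, 14, 24, 34, 44, 58, 64, 84, 98, 119, 137, 155, 177, 194, 220, 250, 280, 310, 338, 382, 403, 439, 461, 511, 535, 593, 625, 658, 698, 742, 790, 842, 898, 958, 983, 1051, 1093, 1139, 1219, 1273],
--     },
--     "KANJI_MODE": {
--         "L": [10, 20, 32, 48, 65, 82, 95, 118, 141, 167, 198, 226, 262, 282, 320, 361, 397, 442, 488, 528, 572, 618, 672, 721, 784, 842, 902, 940, 1002, 1066, 1132, 1201, 1273, 1347, 1417, 1496, 1577, 1661, 1729, 1817],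
--         "M": [8, 16, 26, 38, 52, 65, 75, 93, 111, 131, 155, 177, 204, 223, 254, 277, 310, 345, 384, 410, 438, 480, 528, 561, 614, 652, 692, 732, 778, 843, 894, 947, 1002, 1060, 1113, 1176, 1224, 1292, 1362, 1435],
--         "Q": [7, 12, 20, 28, 37, 45, 53, 66, 80, 93, 109, 125, 149, 159, 180, 198, 224, 243, 272, 297, 314, 348, 376, 407, 440, 462, 496, 534, 559, 604, 634, 684, 719, 756, 790, 832, 876, 923, 972, 1024],
--         "H": [4, 8, 15, 21, 27, 36, 39, 52, 60, 74, 85, 96, 109, 120, 136, 154, 173, 191, 208, 235, 248, 270, 284, 315, 330, 365, 385, 405, 430, 457, 486, 518, 553, 590, 605, 647, 673, 701, 750, 784],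
--     },
-- }
--
--
-- def determine_smallest_qr_version(
--         encoding_mode: str,
--         error_correction_level: str,
--         data: str):
--     """Binary search over a numeric capacity table instead of scanning and re-parsing a CSV string."""
--     capacities = CAPACITY_TABLE[encoding_mode][error_correction_level]
--     n = len(data)
--     lo, hi = 0, len(capacities)
--     while lo < hi:
--         mid = (lo + hi) // 2
--         if capacities[mid] < n:
--             lo = mid + 1
--         else:
--             hi = mid
--     if lo == len(capacities):
--         raise Exception("Data is too large to be fit in any of the QR versions. Please shorten the data.")
--     return lo + 1
-- ===== Notes on version B (the rewrite author's own statement) =====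
-- stated objective: alternative
-- what changed: B replaces the CSV capacity string and A's linear parse-and-test scan with its own numeric table of sorted int lists and a binary search (bisect_left semantics) that returns the first index whose capacity fits, converted to 1-based version numbering.
import Mathlib
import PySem

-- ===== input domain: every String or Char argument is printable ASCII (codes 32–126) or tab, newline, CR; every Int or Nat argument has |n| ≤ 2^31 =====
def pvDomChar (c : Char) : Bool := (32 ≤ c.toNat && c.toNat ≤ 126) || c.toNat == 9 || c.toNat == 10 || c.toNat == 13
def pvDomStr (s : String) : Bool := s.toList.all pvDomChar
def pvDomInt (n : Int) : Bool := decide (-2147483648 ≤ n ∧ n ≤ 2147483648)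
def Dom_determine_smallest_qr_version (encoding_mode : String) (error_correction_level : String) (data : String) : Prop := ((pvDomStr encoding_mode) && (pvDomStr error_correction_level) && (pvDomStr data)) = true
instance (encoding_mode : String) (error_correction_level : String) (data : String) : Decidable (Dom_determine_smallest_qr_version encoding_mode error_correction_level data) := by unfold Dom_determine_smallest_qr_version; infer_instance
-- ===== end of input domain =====

-- B stores the capacity table directly as sorted int lists and finds the version by binary
-- search (bisect_left semantics) instead of A's linear first-fit scan over a CSV string.

-- ===== PORT A =====
-- ENCODING_DATA_SIZES: the module-level nested dict constant.  The row strings are written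
-- as String.ofList of character lists so the kernel can evaluate them (same string values).
def pvRowNL : List Char := ['4', '1', ',', '7', '7', ',', '1', '2', '7', ',', '1', '8', '7', ',', '2', '5', '5', ',', '3', '2', '2', ',', '3', '7', '0', ',', '4', '6', '1', ',', '5', '5', '2', ',', '6', '5', '2', ',', '7', '7', '2', ',', '8', '8', '3', ',', '1', '0', '2', '2', ',', '1', '1', '0', '1', ',', '1', '2', '5', '0', ',', '1', '4', '0', '8', ',', '1', '5', '4', '8', ',', '1', '7', '2', '5', ',', '1', '9', '0', '3', ',', '2', '0', '6', '1', ',', '2', '2', '3', '2', ',', '2', '4', '0', '9', ',', '2', '6', '2', '0', ',', '2', '8', '1', '2', ',', '3', '0', '5', '7', ',', '3', '2', '8', '3', ',', '3', '5', '1', '7', ',', '3', '6', '6', '9', ',', '3', '9', '0', '9', ',', '4', '1', '5', '8', ',', '4', '4', '1', '7', ',', '4', '6', '8', '6', ',', '4', '9', '6', '5', ',', '5', '2', '5', '3', ',', '5', '5', '2', '9', ',', '5', '8', '3', '6', ',', '6', '1', '5', '3', ',', '6', '4', '7', '9', ',', '6', '7', '4', '3', ',', '7', '0', '8', '9']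
def pvRowNM : List Char := ['3', '4', ',', '6', '3', ',', '1', '0', '1', ',', '1', '4', '9', ',', '2', '0', '2', ',', '2', '5', '5', ',', '2', '9', '3', ',', '3', '6', '5', ',', '4', '3', '2', ',', '5', '1', '3', ',', '6', '0', '4', ',', '6', '9', '1', ',', '7', '9', '6', ',', '8', '7', '1', ',', '9', '9', '1', ',', '1', '0', '8', '2', ',', '1', '2', '1', '2', ',', '1', '3', '4', '6', ',', '1', '5', '0', '0', ',', '1', '6', '0', '0', ',', '1', '7', '0', '8', ',', '1', '8', '7', '2', ',', '2', '0', '5', '9', ',', '2', '1', '8', '8', ',', '2', '3', '9', '5', ',', '2', '5', '4', '4', ',', '2', '7', '0', '1', ',', '2', '8', '5', '7', ',', '3', '0', '3', '5', ',', '3', '2', '8', '9', ',', '3', '4', '8', '6', ',', '3', '6', '9', '3', ',', '3', '9', '0', '9', ',', '4', '1', '3', '4', ',', '4', '3', '4', '3', ',', '4', '5', '8', '8', ',', '4', '7', '7', '5', ',', '5', '0', '3', '9', ',', '5', '3', '1', '3', ',', '5', '5', '9', '6']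
def pvRowNQ : List Char := ['2', '7', ',', '4', '8', ',', '7', '7', ',', '1', '1', '1', ',', '1', '4', '4', ',', '1', '7', '8', ',', '2', '0', '7', ',', '2', '5', '9', ',', '3', '1', '2', ',', '3', '6', '4', ',', '4', '2', '7', ',', '4', '8', '9', ',', '5', '8', '0', ',', '6', '2', '1', ',', '7', '0', '3', ',', '7', '7', '5', ',', '8', '7', '6', ',', '9', '4', '8', ',', '1', '0', '6', '3', ',', '1', '1', '5', '9', ',', '1', '2', '2', '4', ',', '1', '3', '5', '8', ',', '1', '4', '6', '8', ',', '1', '5', '8', '8', ',', '1', '7', '1', '8', ',', '1', '8', '0', '4', ',', '1', '9', '3', '3', ',', '2', '0', '8', '5', ',', '2', '1', '8', '1', ',', '2', '3', '5', '8', ',', '2', '4', '7', '3', ',', '2', '6', '7', '0', ',', '2', '8', '0', '5', ',', '2', '9', '4', '9', ',', '3', '0', '8', '1', ',', '3', '2', '4', '4', ',', '3', '4', '1', '7', ',', '3', '5', '9', '9', ',', '3', '7', '9', '1', ',', '3', '9', '9', '3']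
def pvRowNH : List Char := ['1', '7', ',', '3', '4', ',', '5', '8', ',', '8', '2', ',', '1', '0', '6', ',', '1', '3', '9', ',', '1', '5', '4', ',', '2', '0', '2', ',', '2', '3', '5', ',', '2', '8', '8', ',', '3', '3', '1', ',', '3', '7', '4', ',', '4', '2', '7', ',', '4', '6', '8', ',', '5', '3', '0', ',', '6', '0', '2', ',', '6', '7', '4', ',', '7', '4', '6', ',', '8', '1', '3', ',', '9', '1', '9', ',', '9', '6', '9', ',', '1', '0', '5', '6', ',', '1', '1', '0', '8', ',', '1', '2', '2', '8', ',', '1', '2', '8', '6', ',', '1', '4', '2', '5', ',', '1', '5', '0', '1', ',', '1', '5', '8', '1', ',', '1', '6', '7', '7', ',', '1', '7', '8', '2', ',', '1', '8', '9', '7', ',', '2', '0', '2', '2', ',', '2', '1', '5', '7', ',', '2', '3', '0', '1', ',', '2', '3', '6', '1', ',', '2', '5', '2', '4', ',', '2', '6', '2', '5', ',', '2', '7', '3', '5', ',', '2', '9', '2', '7', ',', '3', '0', '5', '7']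
def pvRowAL : List Char := ['2', '5', ',', '4', '7', ',', '7', '7', ',', '1', '1', '4', ',', '1', '5', '4', ',', '1', '9', '5', ',', '2', '2', '4', ',', '2', '7', '9', ',', '3', '3', '5', ',', '3', '9', '5', ',', '4', '6', '8', ',', '5', '3', '5', ',', '6', '1', '9', ',', '6', '6', '7', ',', '7', '5', '8', ',', '8', '5', '4', ',', '9', '3', '8', ',', '1', '0', '4', '6', ',', '1', '1', '5', '3', ',', '1', '2', '4', '9', ',', '1', '3', '5', '2', ',', '1', '4', '6', '0', ',', '1', '5', '8', '8', ',', '1', '7', '0', '4', ',', '1', '8', '5', '3', ',', '1', '9', '9', '0', ',', '2', '1', '3', '2', ',', '2', '2', '2', '3', ',', '2', '3', '6', '9', ',', '2', '5', '2', '0', ',', '2', '6', '7', '7', ',', '2', '8', '4', '0', ',', '3', '0', '0', '9', ',', '3', '1', '8', '3', ',', '3', '3', '5', '1', ',', '3', '5', '3', '7', ',', '3', '7', '2', '9', ',', '3', '9', '2', '7', ',', '4', '0', '8', '7', ',', '4', '2', '9', '6']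
def pvRowAM : List Char := ['2', '0', ',', '3', '8', ',', '6', '1', ',', '9', '0', ',', '1', '2', '2', ',', '1', '5', '4', ',', '1', '7', '8', ',', '2', '2', '1', ',', '2', '6', '2', ',', '3', '1', '1', ',', '3', '6', '6', ',', '4', '1', '9', ',', '4', '8', '3', ',', '5', '2', '8', ',', '6', '0', '0', ',', '6', '5', '6', ',', '7', '3', '4', ',', '8', '1', '6', ',', '9', '0', '9', ',', '9', '7', '0', ',', '1', '0', '3', '5', ',', '1', '1', '3', '4', ',', '1', '2', '4', '8', ',', '1', '3', '2', '6', ',', '1', '4', '5', '1', ',', '1', '5', '4', '2', ',', '1', '6', '3', '7', ',', '1', '7', '3', '2', ',', '1', '8', '3', '9', ',', '1', '9', '9', '4', ',', '2', '1', '1', '3', ',', '2', '2', '3', '8', ',', '2', '3', '6', '9', ',', '2', '5', '0', '6', ',', '2', '6', '3', '2', ',', '2', '7', '8', '0', ',', '2', '8', '9', '4', ',', '3', '0', '5', '4', ',', '3', '2', '2', '0', ',', '3', '3', '9', '1']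
def pvRowAQ : List Char := ['1', '6', ',', '2', '9', ',', '4', '7', ',', '6', '7', ',', '8', '7', ',', '1', '0', '8', ',', '1', '2', '5', ',', '1', '5', '7', ',', '1', '8', '9', ',', '2', '2', '1', ',', '2', '5', '9', ',', '2', '9', '6', ',', '3', '5', '2', ',', '3', '7', '6', ',', '4', '2', '6', ',', '4', '7', '0', ',', '5', '3', '1', ',', '5', '7', '4', ',', '6', '4', '4', ',', '7', '0', '2', ',', '7', '4', '2', ',', '8', '2', '3', ',', '8', '9', '0', ',', '9', '6', '3', ',', '1', '0', '4', '1', ',', '1', '0', '9', '4', ',', '1', '1', '7', '2', ',', '1', '2', '6', '3', ',', '1', '3', '2', '2', ',', '1', '4', '2', '9', ',', '1', '4', '9', '9', ',', '1', '6', '1', '8', ',', '1', '7', '0', '0', ',', '1', '7', '8', '7', ',', '1', '8', '6', '7', ',', '1', '9', '6', '6', ',', '2', '0', '7', '1', ',', '2', '1', '8', '1', ',', '2', '2', '9', '8', ',', '2', '4', '2', '0']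
def pvRowAH : List Char := ['1', '0', ',', '2', '0', ',', '3', '5', ',', '5', '0', ',', '6', '4', ',', '8', '4', ',', '9', '3', ',', '1', '2', '2', ',', '1', '4', '3', ',', '1', '7', '4', ',', '2', '0', '0', ',', '2', '2', '7', ',', '2', '5', '9', ',', '2', '8', '3', ',', '3', '2', '1', ',', '3', '6', '5', ',', '4', '0', '8', ',', '4', '5', '2', ',', '4', '9', '3', ',', '5', '5', '7', ',', '5', '8', '7', ',', '6', '4', '0', ',', '6', '7', '2', ',', '7', '4', '4', ',', '7', '7', '9', ',', '8', '6', '4', ',', '9', '1', '0', ',', '9', '5', '8', ',', '1', '0', '1', '6', ',', '1', '0', '8', '0', ',', '1', '1', '5', '0', ',', '1', '2', '2', '6', ',', '1', '3', '0', '7', ',', '1', '3', '9', '4', ',', '1', '4', '3', '1', ',', '1', '5', '3', '0', ',', '1', '5', '9', '1', ',', '1', '6', '5', '8', ',', '1', '7', '7', '4', ',', '1', '8', '5', '2']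
def pvRowBL : List Char := ['1', '7', ',', '3', '2', ',', '5', '3', ',', '7', '8', ',', '1', '0', '6', ',', '1', '3', '4', ',', '1', '5', '4', ',', '1', '9', '2', ',', '2', '3', '0', ',', '2', '7', '1', ',', '3', '2', '1', ',', '3', '6', '7', ',', '4', '2', '5', ',', '4', '5', '8', ',', '5', '2', '0', ',', '5', '8', '6', ',', '6', '4', '4', ',', '7', '1', '8', ',', '7', '9', '2', ',', '8', '5', '8', ',', '9', '2', '9', ',', '1', '0', '0', '3', ',', '1', '0', '9', '1', ',', '1', '1', '7', '1', ',', '1', '2', '7', '3', ',', '1', '3', '6', '7', ',', '1', '4', '6', '5', ',', '1', '5', '2', '8', ',', '1', '6', '2', '8', ',', '1', '7', '3', '2', ',', '1', '8', '4', '0', ',', '1', '9', '5', '2', ',', '2', '0', '6', '8', ',', '2', '1', '8', '8', ',', '2', '3', '0', '3', ',', '2', '4', '3', '1', ',', '2', '5', '6', '3', ',', '2', '6', '9', '9', ',', '2', '8', '0', '9', ',', '2', '9', '5', '3']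
def pvRowBM : List Char := ['1', '4', ',', '2', '6', ',', '4', '2', ',', '6', '2', ',', '8', '4', ',', '1', '0', '6', ',', '1', '2', '2', ',', '1', '5', '2', ',', '1', '8', '0', ',', '2', '1', '3', ',', '2', '5', '1', ',', '2', '8', '7', ',', '3', '3', '1', ',', '3', '6', '2', ',', '4', '1', '2', ',', '4', '5', '0', ',', '5', '0', '4', ',', '5', '6', '0', ',', '6', '2', '4', ',', '6', '6', '6', ',', '7', '1', '1', ',', '7', '7', '9', ',', '8', '5', '7', ',', '9', '1', '1', ',', '9', '9', '7', ',', '1', '0', '5', '9', ',', '1', '1', '2', '5', ',', '1', '1', '9', '0', ',', '1', '2', '6', '4', ',', '1', '3', '7', '0', ',', '1', '4', '5', '2', ',', '1', '5', '3', '8', ',', '1', '6', '2', '8', ',', '1', '7', '2', '2', ',', '1', '8', '0', '9', ',', '1', '9', '1', '1', ',', '1', '9', '8', '9', ',', '2', '0', '9', '9', ',', '2', '2', '1', '3', ',', '2', '3', '3', '1']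
def pvRowBQ : List Char := ['1', '1', ',', '2', '0', ',', '3', '2', ',', '4', '6', ',', '6', '0', ',', '7', '4', ',', '8', '6', ',', '1', '0', '8', ',', '1', '3', '0', ',', '1', '5', '1', ',', '1', '7', '7', ',', '2', '0', '3', ',', '2', '4', '1', ',', '2', '5', '8', ',', '2', '9', '2', ',', '3', '2', '2', ',', '3', '6', '4', ',', '3', '9', '4', ',', '4', '4', '2', ',', '4', '8', '2', ',', '5', '0', '9', ',', '5', '6', '5', ',', '6', '1', '1', ',', '6', '6', '1', ',', '7', '1', '5', ',', '7', '5', '1', ',', '8', '0', '5', ',', '8', '6', '8', ',', '9', '0', '8', ',', '9', '8', '2', ',', '1', '0', '3', '0', ',', '1', '1', '1', '2', ',', '1', '1', '6', '8', ',', '1', '2', '2', '8', ',', '1', '2', '8', '3', ',', '1', '3', '5', '1', ',', '1', '4', '2', '3', ',', '1', '4', '9', '9', ',', '1', '5', '7', '9', ',', '1', '6', '6', '3']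
def pvRowBH : List Char := ['7', ',', '1', '4', ',', '2', '4', ',', '3', '4', ',', '4', '4', ',', '5', '8', ',', '6', '4', ',', '8', '4', ',', '9', '8', ',', '1', '1', '9', ',', '1', '3', '7', ',', '1', '5', '5', ',', '1', '7', '7', ',', '1', '9', '4', ',', '2', '2', '0', ',', '2', '5', '0', ',', '2', '8', '0', ',', '3', '1', '0', ',', '3', '3', '8', ',', '3', '8', '2', ',', '4', '0', '3', ',', '4', '3', '9', ',', '4', '6', '1', ',', '5', '1', '1', ',', '5', '3', '5', ',', '5', '9', '3', ',', '6', '2', '5', ',', '6', '5', '8', ',', '6', '9', '8', ',', '7', '4', '2', ',', '7', '9', '0', ',', '8', '4', '2', ',', '8', '9', '8', ',', '9', '5', '8', ',', '9', '8', '3', ',', '1', '0', '5', '1', ',', '1', '0', '9', '3', ',', '1', '1', '3', '9', ',', '1', '2', '1', '9', ',', '1', '2', '7', '3']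
def pvRowKL : List Char := ['1', '0', ',', '2', '0', ',', '3', '2', ',', '4', '8', ',', '6', '5', ',', '8', '2', ',', '9', '5', ',', '1', '1', '8', ',', '1', '4', '1', ',', '1', '6', '7', ',', '1', '9', '8', ',', '2', '2', '6', ',', '2', '6', '2', ',', '2', '8', '2', ',', '3', '2', '0', ',', '3', '6', '1', ',', '3', '9', '7', ',', '4', '4', '2', ',', '4', '8', '8', ',', '5', '2', '8', ',', '5', '7', '2', ',', '6', '1', '8', ',', '6', '7', '2', ',', '7', '2', '1', ',', '7', '8', '4', ',', '8', '4', '2', ',', '9', '0', '2', ',', '9', '4', '0', ',', '1', '0', '0', '2', ',', '1', '0', '6', '6', ',', '1', '1', '3', '2', ',', '1', '2', '0', '1', ',', '1', '2', '7', '3', ',', '1', '3', '4', '7', ',', '1', '4', '1', '7', ',', '1', '4', '9', '6', ',', '1', '5', '7', '7', ',', '1', '6', '6', '1', ',', '1', '7', '2', '9', ',', '1', '8', '1', '7']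
def pvRowKM : List Char := ['8', ',', '1', '6', ',', '2', '6', ',', '3', '8', ',', '5', '2', ',', '6', '5', ',', '7', '5', ',', '9', '3', ',', '1', '1', '1', ',', '1', '3', '1', ',', '1', '5', '5', ',', '1', '7', '7', ',', '2', '0', '4', ',', '2', '2', '3', ',', '2', '5', '4', ',', '2', '7', '7', ',', '3', '1', '0', ',', '3', '4', '5', ',', '3', '8', '4', ',', '4', '1', '0', ',', '4', '3', '8', ',', '4', '8', '0', ',', '5', '2', '8', ',', '5', '6', '1', ',', '6', '1', '4', ',', '6', '5', '2', ',', '6', '9', '2', ',', '7', '3', '2', ',', '7', '7', '8', ',', '8', '4', '3', ',', '8', '9', '4', ',', '9', '4', '7', ',', '1', '0', '0', '2', ',', '1', '0', '6', '0', ',', '1', '1', '1', '3', ',', '1', '1', '7', '6', ',', '1', '2', '2', '4', ',', '1', '2', '9', '2', ',', '1', '3', '6', '2', ',', '1', '4', '3', '5']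
def pvRowKQ : List Char := ['7', ',', '1', '2', ',', '2', '0', ',', '2', '8', ',', '3', '7', ',', '4', '5', ',', '5', '3', ',', '6', '6', ',', '8', '0', ',', '9', '3', ',', '1', '0', '9', ',', '1', '2', '5', ',', '1', '4', '9', ',', '1', '5', '9', ',', '1', '8', '0', ',', '1', '9', '8', ',', '2', '2', '4', ',', '2', '4', '3', ',', '2', '7', '2', ',', '2', '9', '7', ',', '3', '1', '4', ',', '3', '4', '8', ',', '3', '7', '6', ',', '4', '0', '7', ',', '4', '4', '0', ',', '4', '6', '2', ',', '4', '9', '6', ',', '5', '3', '4', ',', '5', '5', '9', ',', '6', '0', '4', ',', '6', '3', '4', ',', '6', '8', '4', ',', '7', '1', '9', ',', '7', '5', '6', ',', '7', '9', '0', ',', '8', '3', '2', ',', '8', '7', '6', ',', '9', '2', '3', ',', '9', '7', '2', ',', '1', '0', '2', '4']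
def pvRowKH : List Char := ['4', ',', '8', ',', '1', '5', ',', '2', '1', ',', '2', '7', ',', '3', '6', ',', '3', '9', ',', '5', '2', ',', '6', '0', ',', '7', '4', ',', '8', '5', ',', '9', '6', ',', '1', '0', '9', ',', '1', '2', '0', ',', '1', '3', '6', ',', '1', '5', '4', ',', '1', '7', '3', ',', '1', '9', '1', ',', '2', '0', '8', ',', '2', '3', '5', ',', '2', '4', '8', ',', '2', '7', '0', ',', '2', '8', '4', ',', '3', '1', '5', ',', '3', '3', '0', ',', '3', '6', '5', ',', '3', '8', '5', ',', '4', '0', '5', ',', '4', '3', '0', ',', '4', '5', '7', ',', '4', '8', '6', ',', '5', '1', '8', ',', '5', '5', '3', ',', '5', '9', '0', ',', '6', '0', '5', ',', '6', '4', '7', ',', '6', '7', '3', ',', '7', '0', '1', ',', '7', '5', '0', ',', '7', '8', '4']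

def pvTable : PySem.Dict String (PySem.Dict String String) := PySem.Dict.ofList [
  ("NUMERIC_MODE", PySem.Dict.ofList [
    ("L", String.ofList pvRowNL),
    ("M", String.ofList pvRowNM),
    ("Q", String.ofList pvRowNQ),
    ("H", String.ofList pvRowNH)]),
  ("ALPHANUMERIC_MODE", PySem.Dict.ofList [
    ("L", String.ofList pvRowAL),
    ("M", String.ofList pvRowAM),
    ("Q", String.ofList pvRowAQ),
    ("H", String.ofList pvRowAH)]),
  ("BYTE_MODE", PySem.Dict.ofList [
    ("L", String.ofList pvRowBL),
    ("M", String.ofList pvRowBM),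
    ("Q", String.ofList pvRowBQ),
    ("H", String.ofList pvRowBH)]),
  ("KANJI_MODE", PySem.Dict.ofList [
    ("L", String.ofList pvRowKL),
    ("M", String.ofList pvRowKM),
    ("Q", String.ofList pvRowKQ),
    ("H", String.ofList pvRowKH)])]

-- the capacity-row lookup ENCODING_DATA_SIZES[encoding_mode][error_correction_level];
-- a failed lookup is Python's KeyError (excluded by Pre_), the "" default is unreachable there
def pvCapRow (encoding_mode : String) (error_correction_level : String) : String :=
  (pvTable.getD encoding_mode PySem.Dict.empty).getD error_correction_level ""

-- A's for-loop: i += 1; if len(data) <= int(size): return i.  0 stands for the two raise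
-- paths (loop exhausted -> Exception, int() ValueError), both outside Pre_ / unreachable.
def pvALoop (n : Int) (i : Int) : List String → Int
  | [] => 0
  | s :: rest =>
    match PySem.Int.ofStr? s with
    | some v => if n ≤ v then i + 1 else pvALoop n (i + 1) rest
    | none => 0

def determine_smallest_qr_version (encoding_mode : String) (error_correction_level : String) (data : String) : Int :=
  pvALoop (PySem.Str.len data) 0
    ((PySem.Str.split? (pvCapRow encoding_mode error_correction_level) ",").getD [])

-- ===== PORT B =====
-- CAPACITY_TABLE: B's own module-level constant, the capacities as int lists
def pvIntsNL : List Int := [41, 77, 127, 187, 255, 322, 370, 461, 552, 652, 772, 883, 1022, 1101, 1250, 1408, 1548, 1725, 1903, 2061, 2232, 2409, 2620, 2812, 3057, 3283, 3517, 3669, 3909, 4158, 4417, 4686, 4965, 5253, 5529, 5836, 6153, 6479, 6743, 7089]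
def pvIntsNM : List Int := [34, 63, 101, 149, 202, 255, 293, 365, 432, 513, 604, 691, 796, 871, 991, 1082, 1212, 1346, 1500, 1600, 1708, 1872, 2059, 2188, 2395, 2544, 2701, 2857, 3035, 3289, 3486, 3693, 3909, 4134, 4343, 4588, 4775, 5039, 5313, 5596]
def pvIntsNQ : List Int := [27, 48, 77, 111, 144, 178, 207, 259, 312, 364, 427, 489, 580, 621, 703, 775, 876, 948, 1063, 1159, 1224, 1358, 1468, 1588, 1718, 1804, 1933, 2085, 2181, 2358, 2473, 2670, 2805, 2949, 3081, 3244, 3417, 3599, 3791, 3993]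
def pvIntsNH : List Int := [17, 34, 58, 82, 106, 139, 154, 202, 235, 288, 331, 374, 427, 468, 530, 602, 674, 746, 813, 919, 969, 1056, 1108, 1228, 1286, 1425, 1501, 1581, 1677, 1782, 1897, 2022, 2157, 2301, 2361, 2524, 2625, 2735, 2927, 3057]
def pvIntsAL : List Int := [25, 47, 77, 114, 154, 195, 224, 279, 335, 395, 468, 535, 619, 667, 758, 854, 938, 1046, 1153, 1249, 1352, 1460, 1588, 1704, 1853, 1990, 2132, 2223, 2369, 2520, 2677, 2840, 3009, 3183, 3351, 3537, 3729, 3927, 4087, 4296]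
def pvIntsAM : List Int := [20, 38, 61, 90, 122, 154, 178, 221, 262, 311, 366, 419, 483, 528, 600, 656, 734, 816, 909, 970, 1035, 1134, 1248, 1326, 1451, 1542, 1637, 1732, 1839, 1994, 2113, 2238, 2369, 2506, 2632, 2780, 2894, 3054, 3220, 3391]
def pvIntsAQ : List Int := [16, 29, 47, 67, 87, 108, 125, 157, 189, 221, 259, 296, 352, 376, 426, 470, 531, 574, 644, 702, 742, 823, 890, 963, 1041, 1094, 1172, 1263, 1322, 1429, 1499, 1618, 1700, 1787, 1867, 1966, 2071, 2181, 2298, 2420]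
def pvIntsAH : List Int := [10, 20, 35, 50, 64, 84, 93, 122, 143, 174, 200, 227, 259, 283, 321, 365, 408, 452, 493, 557, 587, 640, 672, 744, 779, 864, 910, 958, 1016, 1080, 1150, 1226, 1307, 1394, 1431, 1530, 1591, 1658, 1774, 1852]
def pvIntsBL : List Int := [17, 32, 53, 78, 106, 134, 154, 192, 230, 271, 321, 367, 425, 458, 520, 586, 644, 718, 792, 858, 929, 1003, 1091, 1171, 1273, 1367, 1465, 1528, 1628, 1732, 1840, 1952, 2068, 2188, 2303, 2431, 2563, 2699, 2809, 2953]
def pvIntsBM : List Int := [14, 26, 42, 62, 84, 106, 122, 152, 180, 213, 251, 287, 331, 362, 412, 450, 504, 560, 624, 666, 711, 779, 857, 911, 997, 1059, 1125, 1190, 1264, 1370, 1452, 1538, 1628, 1722, 1809, 1911, 1989, 2099, 2213, 2331]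
def pvIntsBQ : List Int := [11, 20, 32, 46, 60, 74, 86, 108, 130, 151, 177, 203, 241, 258, 292, 322, 364, 394, 442, 482, 509, 565, 611, 661, 715, 751, 805, 868, 908, 982, 1030, 1112, 1168, 1228, 1283, 1351, 1423, 1499, 1579, 1663]
def pvIntsBH : List Int := [7, 14, 24, 34, 44, 58, 64, 84, 98, 119, 137, 155, 177, 194, 220, 250, 280, 310, 338, 382, 403, 439, 461, 511, 535, 593, 625, 658, 698, 742, 790, 842, 898, 958, 983, 1051, 1093, 1139, 1219, 1273]
def pvIntsKL : List Int := [10, 20, 32, 48, 65, 82, 95, 118, 141, 167, 198, 226, 262, 282, 320, 361, 397, 442, 488, 528, 572, 618, 672, 721, 784, 842, 902, 940, 1002, 1066, 1132, 1201, 1273, 1347, 1417, 1496, 1577, 1661, 1729, 1817]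
def pvIntsKM : List Int := [8, 16, 26, 38, 52, 65, 75, 93, 111, 131, 155, 177, 204, 223, 254, 277, 310, 345, 384, 410, 438, 480, 528, 561, 614, 652, 692, 732, 778, 843, 894, 947, 1002, 1060, 1113, 1176, 1224, 1292, 1362, 1435]
def pvIntsKQ : List Int := [7, 12, 20, 28, 37, 45, 53, 66, 80, 93, 109, 125, 149, 159, 180, 198, 224, 243, 272, 297, 314, 348, 376, 407, 440, 462, 496, 534, 559, 604, 634, 684, 719, 756, 790, 832, 876, 923, 972, 1024]
def pvIntsKH : List Int := [4, 8, 15, 21, 27, 36, 39, 52, 60, 74, 85, 96, 109, 120, 136, 154, 173, 191, 208, 235, 248, 270, 284, 315, 330, 365, 385, 405, 430, 457, 486, 518, 553, 590, 605, 647, 673, 701, 750, 784]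

def pvCapInts : PySem.Dict String (PySem.Dict String (List Int)) := PySem.Dict.ofList [
  ("NUMERIC_MODE", PySem.Dict.ofList [
    ("L", pvIntsNL),
    ("M", pvIntsNM),
    ("Q", pvIntsNQ),
    ("H", pvIntsNH)]),
  ("ALPHANUMERIC_MODE", PySem.Dict.ofList [
    ("L", pvIntsAL),
    ("M", pvIntsAM),
    ("Q", pvIntsAQ),
    ("H", pvIntsAH)]),
  ("BYTE_MODE", PySem.Dict.ofList [
    ("L", pvIntsBL),
    ("M", pvIntsBM),
    ("Q", pvIntsBQ),
    ("H", pvIntsBH)]),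
  ("KANJI_MODE", PySem.Dict.ofList [
    ("L", pvIntsKL),
    ("M", pvIntsKM),
    ("Q", pvIntsKQ),
    ("H", pvIntsKH)])]

-- B's hand-written bisect_left while-loop; (lo+hi)//2 on the Nat indices is Python's //,
-- and capacities[mid] is in range whenever lo < hi ≤ len (the getD default is unreachable)
def pvBsLoop (vs : List Int) (n : Int) (lo hi : Nat) : Nat :=
  if lo < hi then
    if vs.getD ((lo + hi) / 2) 0 < n then pvBsLoop vs n ((lo + hi) / 2 + 1) hi
    else pvBsLoop vs n lo ((lo + hi) / 2)
  else lo
termination_by hi - lo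
decreasing_by all_goals omega

def determine_smallest_qr_version_alt (encoding_mode : String) (error_correction_level : String) (data : String) : Int :=
  let capacities := (pvCapInts.getD encoding_mode PySem.Dict.empty).getD error_correction_level []
  let lo := pvBsLoop capacities (PySem.Str.len data) 0 capacities.length
  if lo = capacities.length then 0 else (lo : Int) + 1   -- 0 = the raise path, outside Pre_

-- ===== PRECONDITION & SPEC =====
-- the (mode, level) keys of ENCODING_DATA_SIZES with the largest capacity of each row
def pvCaps : List ((String × String) × Nat) := [
  (("NUMERIC_MODE", "L"), 7089),
  (("NUMERIC_MODE", "M"), 5596),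
  (("NUMERIC_MODE", "Q"), 3993),
  (("NUMERIC_MODE", "H"), 3057),
  (("ALPHANUMERIC_MODE", "L"), 4296),
  (("ALPHANUMERIC_MODE", "M"), 3391),
  (("ALPHANUMERIC_MODE", "Q"), 2420),
  (("ALPHANUMERIC_MODE", "H"), 1852),
  (("BYTE_MODE", "L"), 2953),
  (("BYTE_MODE", "M"), 2331),
  (("BYTE_MODE", "Q"), 1663),
  (("BYTE_MODE", "H"), 1273),
  (("KANJI_MODE", "L"), 1817),
  (("KANJI_MODE", "M"), 1435),
  (("KANJI_MODE", "Q"), 1024),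
  (("KANJI_MODE", "H"), 784)]

-- Pre_: the two keys exist (otherwise Python raises KeyError) and the data fits in some
-- version of that row (otherwise A raises "Data is too large ..."); these are exactly the
-- inputs on which Python A returns normally.
def Pre_determine_smallest_qr_version (encoding_mode : String) (error_correction_level : String) (data : String) : Prop :=
  pvCaps.any (fun p => p.1.1 == encoding_mode && p.1.2 == error_correction_level
      && decide (data.toList.length ≤ p.2)) = true

instance (encoding_mode : String) (error_correction_level : String) (data : String) : Decidable (Pre_determine_smallest_qr_version encoding_mode error_correction_level data) := by unfold Pre_determine_smallest_qr_version; infer_instance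

def pvWitness_determine_smallest_qr_version : String × String × String := ("BYTE_MODE", "M", "hello")

def Spec_determine_smallest_qr_version (encoding_mode : String) (error_correction_level : String) (data : String) (out : Int) : Prop := out = determine_smallest_qr_version_alt encoding_mode error_correction_level data
instance (encoding_mode : String) (error_correction_level : String) (data : String) (out : Int) : Decidable (Spec_determine_smallest_qr_version encoding_mode error_correction_level data out) := by unfold Spec_determine_smallest_qr_version; infer_instance

-- ===== CLAIM (what is proved, stated in full; the proofs are below) =====
def Claim_equal_determine_smallest_qr_version : Prop := ∀ (encoding_mode : String) (error_correction_level : String) (data : String), Dom_determine_smallest_qr_version encoding_mode error_correction_level data → Pre_determine_smallest_qr_version encoding_mode error_correction_level data → Spec_determine_smallest_qr_version encoding_mode error_correction_level data (determine_smallest_qr_version encoding_mode error_correction_level data)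

-- ===== LEMMAS AND PROOFS =====

-- char-list twin of A's loop (proof device: all row computation happens on List Char)
def pvALoopC (n : Int) (i : Int) : List (List Char) → Int
  | [] => 0
  | t :: rest =>
    match PySem.Int.ofChars? t with
    | some v => if n ≤ v then i + 1 else pvALoopC n (i + 1) rest
    | none => 0

lemma pvALoop_toList (n : Int) : ∀ (i : Int) (ps : List String),
    pvALoop n i ps = pvALoopC n i (ps.map String.toList) := by
  intro i ps
  induction ps generalizing i with
  | nil => rfl
  | cons s rest ih =>
    simp only [pvALoop, pvALoopC, List.map_cons, PySem.Int.ofStr?]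
    cases PySem.Int.ofChars? s.toList with
    | none => rfl
    | some v => simp only [ih]

def pvParseChars (cs : List Char) : List Int :=
  ((PySem.Chars.split? cs [',']).getD []).map (fun t => (PySem.Int.ofChars? t).getD 0)

-- one decidable bundle of facts about a table row: every entry parses, the parsed row
-- is ascending, and its last (largest) capacity is c
def pvRowOK (cs : List Char) (c : Int) : Bool :=
  (((PySem.Chars.split? cs [',']).getD []).all (fun t => (PySem.Int.ofChars? t).isSome)) &&
  (decide ((pvParseChars cs).IsChain (· ≤ ·))) &&
  ((pvParseChars cs).getLast? == some c)

lemma pvSplit_toList (s : String) :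
    ((PySem.Str.split? s ",").getD []).map String.toList
      = (PySem.Chars.split? s.toList [',']).getD [] := by
  have h := PySem.Str.split?_map s ","
  cases hsp : PySem.Str.split? s "," with
  | none => rw [hsp] at h; simp at h; simp [← h]
  | some l => rw [hsp] at h; simp at h; simp [← h]

-- binary-search invariant: pvBsLoop keeps "below lo everything is < n, from hi on ≥ n"
lemma pvBsLoop_inv (vs : List Int) (n : Int) (hs : vs.Pairwise (· ≤ ·)) :
    ∀ (fuel lo hi : Nat), hi - lo ≤ fuel → lo ≤ hi → hi ≤ vs.length →
    (∀ j (hj : j < vs.length), j < lo → vs[j] < n) →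
    (∀ j (hj : j < vs.length), hi ≤ j → n ≤ vs[j]) →
    pvBsLoop vs n lo hi ≤ hi ∧
    (∀ j (hj : j < vs.length), j < pvBsLoop vs n lo hi → vs[j] < n) ∧
    (∀ j (hj : j < vs.length), pvBsLoop vs n lo hi ≤ j → n ≤ vs[j]) := by
  have hpw := List.pairwise_iff_getElem.mp hs
  intro fuel
  induction fuel with
  | zero =>
    intro lo hi hfuel hle hhi hlow hupp
    have heq : ¬ lo < hi := by omega
    rw [pvBsLoop, if_neg heq]
    exact ⟨by omega, hlow, fun j hj hge => hupp j hj (by omega)⟩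
  | succ f ih =>
    intro lo hi hfuel hle hhi hlow hupp
    by_cases h : lo < hi
    · rw [pvBsLoop, if_pos h]
      have hmlen : (lo + hi) / 2 < vs.length := by omega
      rw [List.getD_eq_getElem vs 0 hmlen]
      by_cases hv : vs[(lo + hi) / 2] < n
      · rw [if_pos hv]
        refine ih ((lo + hi) / 2 + 1) hi (by omega) (by omega) hhi ?_ hupp
        intro j hj hjlt
        rcases Nat.lt_or_ge j ((lo + hi) / 2) with hlt | hge
        · exact lt_of_le_of_lt (hpw j ((lo + hi) / 2) hj hmlen hlt) hv
        · have hje : j = (lo + hi) / 2 := by omega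
          subst hje; exact hv
      · rw [if_neg hv]
        rw [not_lt] at hv
        have hside : ∀ j (hj : j < vs.length), (lo + hi) / 2 ≤ j → n ≤ vs[j] := by
          intro j hj hge
          rcases Nat.lt_or_ge ((lo + hi) / 2) j with hlt | hge2
          · exact le_trans hv (hpw ((lo + hi) / 2) j hmlen hj hlt)
          · have hje : j = (lo + hi) / 2 := by omega
            subst hje; exact hv
        obtain ⟨h1, h2, h3⟩ := ih lo ((lo + hi) / 2) (by omega) (by omega) (by omega) hlow hside
        exact ⟨by omega, h2, h3⟩
    · rw [pvBsLoop, if_neg h]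
      exact ⟨by omega, hlow, fun j hj hge => hupp j hj (by omega)⟩

-- A's scan over the pieces returns i + r + 1 when r is the first index whose value fits
lemma pvALoopC_eq (n : Int) :
    ∀ (ps : List (List Char)) (r : Nat) (i : Int),
    (∀ t ∈ ps, (PySem.Int.ofChars? t).isSome = true) →
    (∀ j (hj : j < ps.length), j < r → (PySem.Int.ofChars? ps[j]).getD 0 < n) →
    ∀ (hr : r < ps.length), n ≤ (PySem.Int.ofChars? (ps[r]'hr)).getD 0 →
    pvALoopC n i ps = i + (r : Int) + 1 := by
  intro ps
  induction ps with
  | nil => intro r i _ _ hr; exact absurd hr (by simp)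
  | cons t rest ih =>
    intro r i hall hlow hr hhit
    obtain ⟨v, hv⟩ := Option.isSome_iff_exists.mp (hall t (List.mem_cons_self ..))
    simp only [pvALoopC, hv]
    cases r with
    | zero =>
      have hnv : n ≤ v := by simpa [hv] using hhit
      rw [if_pos hnv]; push_cast; ring
    | succ r' =>
      have hvn : v < n := by
        have := hlow 0 (by simp) (by omega); simpa [hv] using this
      rw [if_neg (not_le.mpr hvn)]
      rw [ih r' (i + 1) (fun t ht => hall t (List.mem_cons_of_mem _ ht))
        (fun j hj hjlt => by
          have := hlow (j + 1) (by simpa using Nat.succ_lt_succ hj) (by omega)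
          simpa using this)
        (by simpa using Nat.lt_of_succ_lt_succ (Nat.succ_lt_succ (Nat.lt_of_succ_lt_succ hr)))
        (by simpa using hhit)]
      push_cast; ring

lemma pvCore (encoding_mode error_correction_level data : String) (cs : List Char) (vs : List Int) (c : Int)
    (hrow : pvCapRow encoding_mode error_correction_level = String.ofList cs)
    (hbrow : (pvCapInts.getD encoding_mode PySem.Dict.empty).getD error_correction_level [] = vs)
    (hvs : pvParseChars cs = vs)
    (hok : pvRowOK cs c = true)
    (hn : PySem.Str.len data ≤ c) :
    determine_smallest_qr_version encoding_mode error_correction_level data =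
    determine_smallest_qr_version_alt encoding_mode error_correction_level data := by
  subst hvs
  simp only [pvRowOK, Bool.and_eq_true, List.all_eq_true, decide_eq_true_eq, beq_iff_eq] at hok
  obtain ⟨⟨hall, hchain⟩, hlast⟩ := hok
  have hs : (pvParseChars cs).Pairwise (· ≤ ·) := hchain.pairwise
  set n := PySem.Str.len data with hndef
  set pieces := (PySem.Chars.split? cs [',']).getD [] with hpiecesdef
  set vs := pvParseChars cs with hvsdef
  have hvs' : vs = pieces.map (fun t => (PySem.Int.ofChars? t).getD 0) := rfl
  have hplen : pieces.length = vs.length := by rw [hvs']; simp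
  have hmap : ((PySem.Str.split? (String.ofList cs) ",").getD []).map String.toList = pieces := by
    rw [pvSplit_toList, String.toList_ofList]
  obtain ⟨hrle, hlow, hupp⟩ := pvBsLoop_inv vs n hs vs.length 0 vs.length (by omega) (by omega)
    (le_refl _) (fun j hj hjlt => absurd hjlt (by omega)) (fun j hj hge => absurd hge (by omega))
  set r := pvBsLoop vs n 0 vs.length with hrdef
  have hne : vs ≠ [] := by intro hnil; rw [hnil] at hlast; simp at hlast
  have hlen0 : 0 < vs.length := List.length_pos_iff.mpr hne
  have hlastEq : vs[vs.length - 1]'(by omega) = c := by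
    rw [List.getLast?_eq_getElem?, List.getElem?_eq_getElem (by omega)] at hlast
    exact Option.some_injective _ hlast
  have hrlt : r < vs.length := by
    by_contra hge
    have hre : vs.length - 1 < r := by omega
    have hcon := hlow (vs.length - 1) (by omega) hre
    rw [hlastEq] at hcon
    omega
  have hhit : n ≤ vs[r]'hrlt := hupp r hrlt (le_refl _)
  simp only [determine_smallest_qr_version, determine_smallest_qr_version_alt, hrow, hbrow]
  rw [pvALoop_toList, hmap, ← hndef, ← hrdef]
  rw [pvALoopC_eq n pieces r 0 hall
    (fun j hj hjlt => by
      have hj' : j < vs.length := by omega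
      have : (PySem.Int.ofChars? pieces[j]).getD 0 = vs[j]'hj' := by
        show _ = (pieces.map (fun t => (PySem.Int.ofChars? t).getD 0))[j]'(by simpa using hj)
        simp
      rw [this]; exact hlow j hj' hjlt)
    (by omega)
    (by
      have : (PySem.Int.ofChars? (pieces[r]'(by omega))).getD 0 = vs[r]'hrlt := by
        show _ = (pieces.map (fun t => (PySem.Int.ofChars? t).getD 0))[r]'(by simp; omega)
        simp
      rw [this]; exact hhit)]
  rw [if_neg (by omega)]
  ring

set_option maxRecDepth 100000 in
set_option maxHeartbeats 2000000 in
-- ===== VERDICT (by name: the statement is the Claim_ definition above) =====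
theorem determine_smallest_qr_version_spec : Claim_equal_determine_smallest_qr_version := by
  intro encoding_mode error_correction_level data _ hpre
  unfold Spec_determine_smallest_qr_version
  unfold Pre_determine_smallest_qr_version at hpre
  simp only [pvCaps, List.any_cons, List.any_nil, Bool.or_eq_true, Bool.and_eq_true,
    beq_iff_eq, decide_eq_true_eq, Bool.or_false] at hpre
  rcases hpre with hpre|hpre|hpre|hpre|hpre|hpre|hpre|hpre|hpre|hpre|hpre|hpre|hpre|hpre|hpre|hpre
  · obtain ⟨⟨h1, h2⟩, h3⟩ := hpre
    subst h1; subst h2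
    exact pvCore _ _ data pvRowNL pvIntsNL 7089 rfl rfl (by decide) (by decide) (by rw [PySem.Str.len_eq]; exact_mod_cast h3)
  · obtain ⟨⟨h1, h2⟩, h3⟩ := hpre
    subst h1; subst h2
    exact pvCore _ _ data pvRowNM pvIntsNM 5596 rfl rfl (by decide) (by decide) (by rw [PySem.Str.len_eq]; exact_mod_cast h3)
  · obtain ⟨⟨h1, h2⟩, h3⟩ := hpre
    subst h1; subst h2
    exact pvCore _ _ data pvRowNQ pvIntsNQ 3993 rfl rfl (by decide) (by decide) (by rw [PySem.Str.len_eq]; exact_mod_cast h3)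
  · obtain ⟨⟨h1, h2⟩, h3⟩ := hpre
    subst h1; subst h2
    exact pvCore _ _ data pvRowNH pvIntsNH 3057 rfl rfl (by decide) (by decide) (by rw [PySem.Str.len_eq]; exact_mod_cast h3)
  · obtain ⟨⟨h1, h2⟩, h3⟩ := hpre
    subst h1; subst h2
    exact pvCore _ _ data pvRowAL pvIntsAL 4296 rfl rfl (by decide) (by decide) (by rw [PySem.Str.len_eq]; exact_mod_cast h3)
  · obtain ⟨⟨h1, h2⟩, h3⟩ := hpre
    subst h1; subst h2
    exact pvCore _ _ data pvRowAM pvIntsAM 3391 rfl rfl (by decide) (by decide) (by rw [PySem.Str.len_eq]; exact_mod_cast h3)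
  · obtain ⟨⟨h1, h2⟩, h3⟩ := hpre
    subst h1; subst h2
    exact pvCore _ _ data pvRowAQ pvIntsAQ 2420 rfl rfl (by decide) (by decide) (by rw [PySem.Str.len_eq]; exact_mod_cast h3)
  · obtain ⟨⟨h1, h2⟩, h3⟩ := hpre
    subst h1; subst h2
    exact pvCore _ _ data pvRowAH pvIntsAH 1852 rfl rfl (by decide) (by decide) (by rw [PySem.Str.len_eq]; exact_mod_cast h3)
  · obtain ⟨⟨h1, h2⟩, h3⟩ := hpre
    subst h1; subst h2
    exact pvCore _ _ data pvRowBL pvIntsBL 2953 rfl rfl (by decide) (by decide) (by rw [PySem.Str.len_eq]; exact_mod_cast h3)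
  · obtain ⟨⟨h1, h2⟩, h3⟩ := hpre
    subst h1; subst h2
    exact pvCore _ _ data pvRowBM pvIntsBM 2331 rfl rfl (by decide) (by decide) (by rw [PySem.Str.len_eq]; exact_mod_cast h3)
  · obtain ⟨⟨h1, h2⟩, h3⟩ := hpre
    subst h1; subst h2
    exact pvCore _ _ data pvRowBQ pvIntsBQ 1663 rfl rfl (by decide) (by decide) (by rw [PySem.Str.len_eq]; exact_mod_cast h3)
  · obtain ⟨⟨h1, h2⟩, h3⟩ := hpre
    subst h1; subst h2
    exact pvCore _ _ data pvRowBH pvIntsBH 1273 rfl rfl (by decide) (by decide) (by rw [PySem.Str.len_eq]; exact_mod_cast h3)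
  · obtain ⟨⟨h1, h2⟩, h3⟩ := hpre
    subst h1; subst h2
    exact pvCore _ _ data pvRowKL pvIntsKL 1817 rfl rfl (by decide) (by decide) (by rw [PySem.Str.len_eq]; exact_mod_cast h3)
  · obtain ⟨⟨h1, h2⟩, h3⟩ := hpre
    subst h1; subst h2
    exact pvCore _ _ data pvRowKM pvIntsKM 1435 rfl rfl (by decide) (by decide) (by rw [PySem.Str.len_eq]; exact_mod_cast h3)
  · obtain ⟨⟨h1, h2⟩, h3⟩ := hpre
    subst h1; subst h2
    exact pvCore _ _ data pvRowKQ pvIntsKQ 1024 rfl rfl (by decide) (by decide) (by rw [PySem.Str.len_eq]; exact_mod_cast h3)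
  · obtain ⟨⟨h1, h2⟩, h3⟩ := hpre
    subst h1; subst h2
    exact pvCore _ _ data pvRowKH pvIntsKH 784 rfl rfl (by decide) (by decide) (by rw [PySem.Str.len_eq]; exact_mod_cast h3)
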